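-- pv_equiv track=rewrite | github.com/tongyx361/symeval | symeval/core.py | norm_str2weekday
-- ===== SOURCE A (Python) =====
-- from typing import Any, Callable, List, Match, Optional, Sequence, Set
--
-- NDAYS_PER_WEEK = 7
--
-- WEEKDAY_ABBRS: List[str] = ["mon", "tue", "wed", "thu", "fri", "sat", "sun"]
--
-- WEEKDAY_FULLS: List[str] = [
--     "monday",
--     "tuesday",
--     "wednesday",
--     "thursday",
--     "friday",
--     "saturday",
--     "sunday",
-- ]
--
-- def norm_str2weekday(s: str) -> Optional[str]:
--     """Converts a string representation of a weekday to its normalized form. Returns `None` if the input is not a valid weekday"""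
--     s = str(s).lower().strip()
--     if " " in s:  # not a word
--         return None
--
--     for i_day in range(NDAYS_PER_WEEK):
--         if s.startswith(WEEKDAY_ABBRS[i_day]):
--             return WEEKDAY_FULLS[i_day].capitalize()
--     return None
-- ===== SOURCE B (Python) =====
-- # Alternative: a hand-written decision tree on the first three characters (no table, no loop).
-- def norm_str2weekday(s):
--     s = str(s).lower().strip()
--     if " " in s:
--         return None
--     if len(s) < 3:
--         return None
--     c0, c1, c2 = s[0], s[1], s[2]
--     if c0 == "m":
--         return "Monday" if (c1, c2) == ("o", "n") else None
--     if c0 == "t":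
--         if (c1, c2) == ("u", "e"):
--             return "Tuesday"
--         if (c1, c2) == ("h", "u"):
--             return "Thursday"
--         return None
--     if c0 == "w":
--         return "Wednesday" if (c1, c2) == ("e", "d") else None
--     if c0 == "f":
--         return "Friday" if (c1, c2) == ("r", "i") else None
--     if c0 == "s":
--         if (c1, c2) == ("a", "t"):
--             return "Saturday"
--         if (c1, c2) == ("u", "n"):
--             return "Sunday"
--         return None
--     return None
-- ===== Notes on version B (the rewrite author's own statement) =====
-- stated objective: alternative
-- what changed: Replaced the loop of startswith tests against a parallel abbreviation/full-name table by a hand-written character decision tree: after the guards it branches on the first character and then compares the next two, returning the full name literal directly (correct because every abbreviation is exactly 3 characters and their first letters split as shown).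
import Mathlib
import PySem

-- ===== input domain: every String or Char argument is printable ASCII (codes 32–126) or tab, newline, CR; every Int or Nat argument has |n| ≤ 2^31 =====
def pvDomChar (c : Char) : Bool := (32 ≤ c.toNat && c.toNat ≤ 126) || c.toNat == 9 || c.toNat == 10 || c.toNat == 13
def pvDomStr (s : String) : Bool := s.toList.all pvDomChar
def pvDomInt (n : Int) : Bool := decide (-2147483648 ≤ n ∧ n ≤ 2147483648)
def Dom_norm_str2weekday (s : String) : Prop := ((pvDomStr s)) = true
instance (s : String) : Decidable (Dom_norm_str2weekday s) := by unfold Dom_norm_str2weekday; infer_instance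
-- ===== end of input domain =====

-- B replaces A's startswith loop over a parallel table by a character decision tree on the first three characters (alternative; same cost).


-- ===== PORT A =====
-- str.capitalize, ported by hand (exact on ASCII): first char uppercased, rest lowercased
def pyCapitalize (s : String) : String :=
  match s.toList with
  | [] => ""
  | c :: cs => String.ofList (PySem.Chars.upperChar c :: PySem.Chars.lower cs)

def weekdayAbbrs : List String := ["mon", "tue", "wed", "thu", "fri", "sat", "sun"]
def weekdayFulls : List String :=
  ["monday", "tuesday", "wednesday", "thursday", "friday", "saturday", "sunday"]

-- the 'for i_day in range(NDAYS_PER_WEEK)' loop with its early return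
def normLoop (t : String) : List Int → Option String
  | [] => none
  | i :: is =>
      if PySem.Str.startswith t (PySem.List.pyGetD weekdayAbbrs i "") then
        some (pyCapitalize (PySem.List.pyGetD weekdayFulls i ""))
      else normLoop t is

def norm_str2weekday (s : String) : Option String :=
  let t := PySem.Str.strip (PySem.Str.lower s)
  if PySem.Str.isIn " " t then none
  else normLoop t (PySem.List.pyRange 0 7 1)

-- ===== PORT B =====
-- the decision tree on the first three characters (Source B's chain of ifs after the length guard)
def weekdayTree (c0 c1 c2 : Char) : Option String :=
  if c0 = 'm' then (if (c1, c2) = ('o', 'n') then some "Monday" else none)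
  else if c0 = 't' then
    if (c1, c2) = ('u', 'e') then some "Tuesday"
    else if (c1, c2) = ('h', 'u') then some "Thursday"
    else none
  else if c0 = 'w' then (if (c1, c2) = ('e', 'd') then some "Wednesday" else none)
  else if c0 = 'f' then (if (c1, c2) = ('r', 'i') then some "Friday" else none)
  else if c0 = 's' then
    if (c1, c2) = ('a', 't') then some "Saturday"
    else if (c1, c2) = ('u', 'n') then some "Sunday"
    else none
  else none

-- Source B's 'len(s) < 3' guard + extraction of s[0], s[1], s[2], on the char list
def weekdayOfChars : List Char → Option String
  | c0 :: c1 :: c2 :: _ => weekdayTree c0 c1 c2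
  | _ => none

def norm_str2weekday_alt (s : String) : Option String :=
  let t := PySem.Str.strip (PySem.Str.lower s)
  if PySem.Str.isIn " " t then none
  else weekdayOfChars t.toList

-- ===== PRECONDITION & SPEC =====
def Spec_norm_str2weekday (s : String) (out : Option String) : Prop := out = norm_str2weekday_alt s
instance (s : String) (out : Option String) : Decidable (Spec_norm_str2weekday s out) := by unfold Spec_norm_str2weekday; infer_instance

-- ===== CLAIM (what is proved, stated in full; the proofs are below) =====
def Claim_equal_norm_str2weekday : Prop := ∀ (s : String), Dom_norm_str2weekday s → Spec_norm_str2weekday s (norm_str2weekday s)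

-- ===== LEMMAS AND PROOFS =====
-- startswith by a 3-letter pattern, characterised on the cons structure of the string
lemma sw_cons3 (a b c : Char) (rest : List Char) (p q r : Char) :
    (PySem.Chars.startswith (a :: b :: c :: rest) [p, q, r] = true) = (a = p ∧ b = q ∧ c = r) := by
  apply propext
  rw [PySem.Chars.startswith_iff]
  simp [List.cons_prefix_cons, eq_comm]

lemma sw_short (l : List Char) (p q r : Char) (h : l.length < 3) :
    PySem.Chars.startswith l [p, q, r] = false := by
  rw [← Bool.not_eq_true, PySem.Chars.startswith_iff]
  intro hp
  have := hp.length_le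
  simp at this; omega

-- the loop over the 7 abbreviations computes exactly the decision tree on the first 3 chars
set_option maxHeartbeats 1600000 in
lemma core_eq (t : String) :
    normLoop t (PySem.List.pyRange 0 7 1) = weekdayOfChars t.toList := by
  have hr : PySem.List.pyRange 0 7 1 = [0, 1, 2, 3, 4, 5, 6] := by decide
  rw [hr]
  simp only [normLoop,
    show PySem.List.pyGetD weekdayAbbrs 0 "" = "mon" from by decide,
    show PySem.List.pyGetD weekdayAbbrs 1 "" = "tue" from by decide,
    show PySem.List.pyGetD weekdayAbbrs 2 "" = "wed" from by decide,
    show PySem.List.pyGetD weekdayAbbrs 3 "" = "thu" from by decide,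
    show PySem.List.pyGetD weekdayAbbrs 4 "" = "fri" from by decide,
    show PySem.List.pyGetD weekdayAbbrs 5 "" = "sat" from by decide,
    show PySem.List.pyGetD weekdayAbbrs 6 "" = "sun" from by decide,
    show pyCapitalize (PySem.List.pyGetD weekdayFulls 0 "") = "Monday" from by decide,
    show pyCapitalize (PySem.List.pyGetD weekdayFulls 1 "") = "Tuesday" from by decide,
    show pyCapitalize (PySem.List.pyGetD weekdayFulls 2 "") = "Wednesday" from by decide,
    show pyCapitalize (PySem.List.pyGetD weekdayFulls 3 "") = "Thursday" from by decide,
    show pyCapitalize (PySem.List.pyGetD weekdayFulls 4 "") = "Friday" from by decide,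
    show pyCapitalize (PySem.List.pyGetD weekdayFulls 5 "") = "Saturday" from by decide,
    show pyCapitalize (PySem.List.pyGetD weekdayFulls 6 "") = "Sunday" from by decide]
  simp only [PySem.Str.startswith_eq,
    show ("mon" : String).toList = ['m','o','n'] from by decide,
    show ("tue" : String).toList = ['t','u','e'] from by decide,
    show ("wed" : String).toList = ['w','e','d'] from by decide,
    show ("thu" : String).toList = ['t','h','u'] from by decide,
    show ("fri" : String).toList = ['f','r','i'] from by decide,
    show ("sat" : String).toList = ['s','a','t'] from by decide,
    show ("sun" : String).toList = ['s','u','n'] from by decide]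
  match hl : t.toList with
  | [] => simp [sw_short, weekdayOfChars]
  | [a] => simp [sw_short, weekdayOfChars]
  | [a, b] => simp [sw_short, weekdayOfChars]
  | a :: b :: c :: rest =>
    simp only [sw_cons3, weekdayOfChars, weekdayTree, Prod.mk.injEq]
    split_ifs with g1 g2 g3 g4 g5 g6 g7 g8 g9 g10 g11 g12 <;>
      simp_all

-- ===== VERDICT (by name: the statement is the Claim_ definition above) =====
theorem norm_str2weekday_spec : Claim_equal_norm_str2weekday := by
  intro s _
  unfold Spec_norm_str2weekday
  simp only [norm_str2weekday, norm_str2weekday_alt]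
  split_ifs
  · rfl
  · exact core_eq _
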